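-- pv_equiv track=rewrite | github.com/floraldo/hive | scripts/archive/syntax_fixes/aggressive_syntax_fix.py | fix_multiline_import
-- ===== SOURCE A (Python) =====
-- from typing import List
--
-- def fix_multiline_import(lines: List[str], start_idx: int) -> str:
--     """Fix multiline import statements."""
--     import_lines = [lines[start_idx]]
--     i = start_idx + 1
--
--     # Collect all lines of the import
--     while i < len(lines) and ")" not in lines[i - 1]:
--         import_lines.append(lines[i])
--         i += 1
--
--     # Fix missing commas
--     fixed_import = []
--     for j, line in enumerate(import_lines):
--         if j < len(import_lines) - 1 and line.strip() and not line.rstrip().endswith(","):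
--             if ")" not in import_lines[j + 1]:
--                 line = line.rstrip() + ",\n"
--         fixed_import.append(line)
--
--     return fixed_import[0]  # Return first line, rest will be handled
-- ===== SOURCE B (Python) =====
-- def fix_multiline_import(lines, start_idx):
--     """Fix multiline import statements (closed-form: only the first line is returned)."""
--     first = lines[start_idx]
--     nxt_idx = start_idx + 1
--     if nxt_idx < len(lines) and ")" not in first:
--         # the import continues onto lines[nxt_idx]
--         if first.strip() and not first.rstrip().endswith(",") and ")" not in lines[nxt_idx]:
--             return first.rstrip() + ",\n"
--     return first
-- ===== Notes on version B (the rewrite author's own statement) =====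
-- stated objective: simpler
-- what changed: B drops A's while-loop line collection and the enumerate comma-fix pass entirely: since A returns only fixed_import[0], B computes that first line directly from lines[start_idx] and lines[start_idx+1] with one closed-form conditional.
import Mathlib
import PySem

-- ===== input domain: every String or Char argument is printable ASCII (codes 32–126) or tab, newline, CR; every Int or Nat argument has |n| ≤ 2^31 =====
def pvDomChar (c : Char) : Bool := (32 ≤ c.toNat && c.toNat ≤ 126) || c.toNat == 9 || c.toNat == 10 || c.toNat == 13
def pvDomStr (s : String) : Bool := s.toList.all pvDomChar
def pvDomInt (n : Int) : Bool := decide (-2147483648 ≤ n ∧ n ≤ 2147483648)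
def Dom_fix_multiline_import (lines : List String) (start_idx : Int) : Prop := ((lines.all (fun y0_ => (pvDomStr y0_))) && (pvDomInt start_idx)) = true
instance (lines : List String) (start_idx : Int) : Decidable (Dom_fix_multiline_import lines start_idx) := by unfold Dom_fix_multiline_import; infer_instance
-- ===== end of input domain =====

-- B drops A's while-loop collection and comma-fix pass: since A returns only fixed_import[0],
-- B computes that first line directly with one closed-form conditional (objective: simpler).


-- ===== PORT A =====
-- while i < len(lines) and ")" not in lines[i-1]: import_lines.append(lines[i]); i += 1
-- (fuel 2*len bounds the iterations, which number at most len - start_idx - 1 ≤ 2*len under Pre_)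
def pvCollectA (lines : List String) : Nat → Int → List String
  | 0, _ => []
  | n + 1, i =>
    if i < (lines.length : Int) ∧ PySem.Str.isIn ")" (PySem.List.pyGetD lines (i - 1) "") = false then
      PySem.List.pyGetD lines i "" :: pvCollectA lines n (i + 1)
    else []

-- for j, line in enumerate(import_lines): … fixed_import.append(line)
def pvFixA (imps : List String) : Nat → List String → List String
  | _, [] => []
  | j, line :: rest =>
    (if j < imps.length - 1 ∧ PySem.Str.strip line ≠ "" ∧
        PySem.Str.endswith (PySem.Str.rstrip line) "," = false then
       if PySem.Str.isIn ")" (PySem.List.pyGetD imps ((j : Int) + 1) "") = false then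
         PySem.Str.rstrip line ++ ",\n"
       else line
     else line) :: pvFixA imps (j + 1) rest

def fix_multiline_import (lines : List String) (start_idx : Int) : String :=
  let import_lines :=
    PySem.List.pyGetD lines start_idx "" :: pvCollectA lines (2 * lines.length) (start_idx + 1)
  let fixed_import := pvFixA import_lines 0 import_lines
  PySem.List.pyGetD fixed_import 0 ""

-- ===== PORT B =====
def fix_multiline_import_alt (lines : List String) (start_idx : Int) : String :=
  let first := PySem.List.pyGetD lines start_idx ""
  let nxt_idx := start_idx + 1
  if nxt_idx < (lines.length : Int) ∧ PySem.Str.isIn ")" first = false then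
    if PySem.Str.strip first ≠ "" ∧ PySem.Str.endswith (PySem.Str.rstrip first) "," = false ∧
       PySem.Str.isIn ")" (PySem.List.pyGetD lines nxt_idx "") = false then
      PySem.Str.rstrip first ++ ",\n"
    else first
  else first

-- ===== PRECONDITION & SPEC =====
-- Pre_ excludes exactly the inputs where A raises IndexError: lines[start_idx] out of range.
def Pre_fix_multiline_import (lines : List String) (start_idx : Int) : Prop :=
  PySem.Raise.InRange lines.length start_idx
instance (lines : List String) (start_idx : Int) : Decidable (Pre_fix_multiline_import lines start_idx) := by unfold Pre_fix_multiline_import; infer_instance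

def pvWitness_fix_multiline_import : List String × Int :=
  (["from x import (\n", "    a\n", "    b,\n", ")\n"], 1)

def Spec_fix_multiline_import (lines : List String) (start_idx : Int) (out : String) : Prop := out = fix_multiline_import_alt lines start_idx
instance (lines : List String) (start_idx : Int) (out : String) : Decidable (Spec_fix_multiline_import lines start_idx out) := by unfold Spec_fix_multiline_import; infer_instance

-- ===== CLAIM (what is proved, stated in full; the proofs are below) =====
def Claim_equal_fix_multiline_import : Prop := ∀ (lines : List String) (start_idx : Int), Dom_fix_multiline_import lines start_idx → Pre_fix_multiline_import lines start_idx → Spec_fix_multiline_import lines start_idx (fix_multiline_import lines start_idx)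

-- ===== LEMMAS AND PROOFS =====

theorem pvCollectA_succ (lines : List String) (n : Nat) (i : Int) :
    pvCollectA lines (n + 1) i =
      if i < (lines.length : Int) ∧ PySem.Str.isIn ")" (PySem.List.pyGetD lines (i - 1) "") = false then
        PySem.List.pyGetD lines i "" :: pvCollectA lines n (i + 1)
      else [] := rfl

theorem pvIfNest (P Q R : Prop) [Decidable P] [Decidable Q] [Decidable R] (a b : String) :
    (if P ∧ Q then if R then a else b else b) = if P ∧ Q ∧ R then a else b := by
  by_cases hP : P <;> by_cases hQ : Q <;> by_cases hR : R <;> simp [hP, hQ, hR]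

-- ===== VERDICT (by name: the statement is the Claim_ definition above) =====
theorem fix_multiline_import_spec : Claim_equal_fix_multiline_import := by
  intro lines start_idx _ hpre
  unfold Spec_fix_multiline_import fix_multiline_import fix_multiline_import_alt
  obtain ⟨h1, h2⟩ := hpre
  have hlen : 0 < lines.length := by omega
  dsimp only
  obtain ⟨k, hk⟩ : ∃ k, 2 * lines.length = k + 1 := ⟨2 * lines.length - 1, by omega⟩
  rw [hk, pvCollectA_succ]
  have hsub : start_idx + 1 - 1 = start_idx := by ring
  rw [hsub]
  by_cases hc : start_idx + 1 < (lines.length : Int) ∧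
      PySem.Str.isIn ")" (PySem.List.pyGetD lines start_idx "") = false
  · rw [if_pos hc, if_pos hc]
    generalize PySem.List.pyGetD lines start_idx "" = first at *
    generalize PySem.List.pyGetD lines (start_idx + 1) "" = x at *
    generalize pvCollectA lines k (start_idx + 1 + 1) = rest
    rw [show pvFixA (first :: x :: rest) 0 (first :: x :: rest) =
        (if 0 < (first :: x :: rest).length - 1 ∧ PySem.Str.strip first ≠ "" ∧
            PySem.Str.endswith (PySem.Str.rstrip first) "," = false then
           if PySem.Str.isIn ")" (PySem.List.pyGetD (first :: x :: rest) (((0:Nat):Int) + 1) "") = false then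
             PySem.Str.rstrip first ++ ",\n"
           else first
         else first) :: pvFixA (first :: x :: rest) 1 (x :: rest) from rfl]
    rw [PySem.List.pyGetD_zero_cons,
        show (((0:Nat):Int) + 1) = ((1:Nat):Int) by norm_num, PySem.List.pyGetD_natCast,
        show List.getD (first :: x :: rest) 1 "" = x from rfl]
    rw [if_congr (by simp :
          (0 < (first :: x :: rest).length - 1 ∧ PySem.Str.strip first ≠ "" ∧
            PySem.Str.endswith (PySem.Str.rstrip first) "," = false) ↔
          (PySem.Str.strip first ≠ "" ∧
            PySem.Str.endswith (PySem.Str.rstrip first) "," = false)) rfl rfl]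
    exact pvIfNest _ _ _ _ _
  · rw [if_neg hc, if_neg hc]
    rw [show pvFixA [PySem.List.pyGetD lines start_idx ""] 0 [PySem.List.pyGetD lines start_idx ""] =
        [if 0 < ([PySem.List.pyGetD lines start_idx ""]).length - 1 ∧
            PySem.Str.strip (PySem.List.pyGetD lines start_idx "") ≠ "" ∧
            PySem.Str.endswith (PySem.Str.rstrip (PySem.List.pyGetD lines start_idx "")) "," = false then
           if PySem.Str.isIn ")" (PySem.List.pyGetD [PySem.List.pyGetD lines start_idx ""] (((0:Nat):Int) + 1) "") = false then
             PySem.Str.rstrip (PySem.List.pyGetD lines start_idx "") ++ ",\n"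
           else PySem.List.pyGetD lines start_idx ""
         else PySem.List.pyGetD lines start_idx ""] from rfl]
    rw [PySem.List.pyGetD_zero_cons]
    simp
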